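-- pv_equiv track=rewrite | github.com/SoudhaAM/Detection-of-Malicious-URLs | Feature_extraction.py | Check_IPaddress
-- ===== SOURCE A (Python) =====
-- def Check_IPaddress(tokens_words):
--
--     cnt=0;
--     for ele in tokens_words:
--
--         if ele.isnumeric():
--             cnt+=1
--         else:
--             if cnt>=4 :
--                 return 1
--             else:
--                 cnt=0;
--     if cnt>=4:
--         return 1
--     return 0
-- ===== SOURCE B (Python) =====
-- def Check_IPaddress(tokens_words):
--     # Build a run-length encoding of the numeric/non-numeric key stream,
--     # then check whether any numeric run has length >= 4.
--     runs = []
--     for ele in tokens_words: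
--         k = ele.isnumeric()
--         if runs and runs[-1][0] == k:
--             runs[-1] = (k, runs[-1][1] + 1)
--         else:
--             runs.append((k, 1))
--     return 1 if any(k and c >= 4 for k, c in runs) else 0
-- ===== Notes on version B (the rewrite author's own statement) =====
-- stated objective: alternative
-- what changed: Replaces A's counter-with-reset loop and early returns by building a run-length encoding of the numeric/non-numeric key stream and then checking, in a separate pass, whether any numeric run has length >= 4.
import Mathlib
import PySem

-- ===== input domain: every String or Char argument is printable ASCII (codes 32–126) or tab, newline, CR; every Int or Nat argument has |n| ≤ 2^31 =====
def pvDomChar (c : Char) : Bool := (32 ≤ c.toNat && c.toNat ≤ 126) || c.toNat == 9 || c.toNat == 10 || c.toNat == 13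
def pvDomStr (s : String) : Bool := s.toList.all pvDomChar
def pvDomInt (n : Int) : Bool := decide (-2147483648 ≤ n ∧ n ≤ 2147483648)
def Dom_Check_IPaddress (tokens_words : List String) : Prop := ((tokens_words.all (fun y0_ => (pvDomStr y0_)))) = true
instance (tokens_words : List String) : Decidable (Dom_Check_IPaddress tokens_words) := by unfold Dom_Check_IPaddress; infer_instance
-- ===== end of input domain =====

-- B replaces A's counter-with-reset loop and early returns by building a
-- run-length encoding of the numeric/non-numeric key stream and then checking
-- whether any numeric run has length >= 4 (objective: alternative, same cost).
-- On the ASCII domain, Python's str.isnumeric coincides with str.isdigit, ported as PySem.Str.strIsdigit.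

-- ===== PORT A =====
-- A's for-loop with early return: structural recursion over the list carrying cnt.
def Check_IPaddress_go (l : List String) (cnt : Int) : Int :=
  match l with
  | [] => if cnt ≥ 4 then 1 else 0
  | ele :: rest =>
    if PySem.Str.strIsdigit ele then
      Check_IPaddress_go rest (cnt + 1)
    else
      if cnt ≥ 4 then 1 else Check_IPaddress_go rest 0

def Check_IPaddress (tokens_words : List String) : Int :=
  Check_IPaddress_go tokens_words 0

-- ===== PORT B =====
-- Source B's loop body: extend the last run if its key matches, else start a new run.
def Check_IPaddress_alt_step (runs : List (Bool × Int)) (k : Bool) : List (Bool × Int) :=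
  match runs.getLast? with
  | some (k0, c) =>
    if k0 = k then runs.dropLast ++ [(k, c + 1)] else runs ++ [(k, 1)]
  | none => runs ++ [(k, 1)]

def Check_IPaddress_alt (tokens_words : List String) : Int :=
  let runs := tokens_words.foldl
    (fun runs ele => Check_IPaddress_alt_step runs (PySem.Str.strIsdigit ele)) []
  if runs.any (fun p => p.1 && decide (p.2 ≥ 4)) then 1 else 0

-- ===== PRECONDITION & SPEC =====
def Spec_Check_IPaddress (tokens_words : List String) (out : Int) : Prop := out = Check_IPaddress_alt tokens_words
instance (tokens_words : List String) (out : Int) : Decidable (Spec_Check_IPaddress tokens_words out) := by unfold Spec_Check_IPaddress; infer_instance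

-- ===== CLAIM (what is proved, stated in full; the proofs are below) =====
def Claim_equal_Check_IPaddress : Prop := ∀ (tokens_words : List String), Dom_Check_IPaddress tokens_words → Spec_Check_IPaddress tokens_words (Check_IPaddress tokens_words)

-- ===== LEMMAS AND PROOFS =====
-- Proof-only intermediate: "some numeric run ≥ 4" given a current run (key, run).
def runF (ks : List Bool) (key : Bool) (run : Int) : Bool :=
  match ks with
  | [] => key && decide (run ≥ 4)
  | k :: rest =>
    if k = key then runF rest key (run + 1)
    else (key && decide (run ≥ 4)) || runF rest k 1

-- A's counter equals the current numeric run length (0 inside a non-numeric run).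
theorem go_eq_runF (xs : List String) : ∀ (key : Bool) (run : Int),
    Check_IPaddress_go xs (if key then run else 0)
      = (if runF (xs.map (fun e => PySem.Str.strIsdigit e)) key run then 1 else 0) := by
  induction xs with
  | nil =>
    intro key run
    cases key <;> simp [Check_IPaddress_go, runF]
  | cons x rest ih =>
    intro key run
    simp only [Check_IPaddress_go, List.map, runF]
    by_cases hx : PySem.Chars.strIsdigit x.toList = true
    · cases key with
      | true => simp [hx]; simpa using ih true (run + 1)
      | false => simp [hx]; simpa using ih true 1
    · have hx' : PySem.Chars.strIsdigit x.toList = false := by simpa using hx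
      cases key with
      | true =>
        by_cases hr : run ≥ 4
        · simp [hx', hr]
        · simp [hx', hr]
          simpa using ih false 1
      | false =>
        simp [hx']
        simpa using ih false (run + 1)

-- Unfolding B's step on an accumulator that ends with the current run.
theorem step_concat_eq (racc : List (Bool × Int)) (key : Bool) (run : Int) (k : Bool)
    (h : key = k) :
    Check_IPaddress_alt_step (racc ++ [(key, run)]) k = racc ++ [(k, run + 1)] := by
  subst h
  simp [Check_IPaddress_alt_step]

theorem step_concat_ne (racc : List (Bool × Int)) (key : Bool) (run : Int) (k : Bool)
    (h : ¬ key = k) :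
    Check_IPaddress_alt_step (racc ++ [(key, run)]) k = (racc ++ [(key, run)]) ++ [(k, 1)] := by
  simp [Check_IPaddress_alt_step, h]

-- B's RLE fold, analysed from an accumulator that ends with the current run.
theorem foldl_step_any (xs : List String) : ∀ (racc : List (Bool × Int)) (key : Bool) (run : Int),
    ((xs.foldl (fun runs ele => Check_IPaddress_alt_step runs (PySem.Str.strIsdigit ele))
        (racc ++ [(key, run)])).any (fun p => p.1 && decide (p.2 ≥ 4)))
      = (racc.any (fun p => p.1 && decide (p.2 ≥ 4))
          || runF (xs.map (fun e => PySem.Str.strIsdigit e)) key run) := by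
  induction xs with
  | nil =>
    intro racc key run
    simp [runF]
  | cons x rest ih =>
    intro racc key run
    simp only [List.foldl, List.map, runF]
    by_cases hk : key = PySem.Str.strIsdigit x
    · rw [step_concat_eq racc key run _ hk, ih racc _ (run + 1)]
      rw [if_pos hk.symm, hk]
    · rw [step_concat_ne racc key run _ hk, ih (racc ++ [(key, run)]) _ 1]
      have hk' : ¬ PySem.Str.strIsdigit x = key := fun h => hk h.symm
      rw [if_neg hk']
      simp [Bool.or_assoc]

-- ===== VERDICT (by name: the statement is the Claim_ definition above) =====
theorem Check_IPaddress_spec : Claim_equal_Check_IPaddress := by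
  intro tokens_words _
  unfold Spec_Check_IPaddress Check_IPaddress Check_IPaddress_alt
  cases tokens_words with
  | nil => simp [Check_IPaddress_go]
  | cons x rest =>
    simp only [List.foldl]
    have hstep : Check_IPaddress_alt_step [] (PySem.Str.strIsdigit x)
        = [] ++ [(PySem.Str.strIsdigit x, 1)] := by
      simp [Check_IPaddress_alt_step]
    simp only [hstep]
    simp only [foldl_step_any rest [] (PySem.Str.strIsdigit x) 1]
    simp only [List.any_nil, Bool.false_or, Check_IPaddress_go]
    cases hx : PySem.Str.strIsdigit x with
    | true =>
      rw [if_pos rfl]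
      have := go_eq_runF rest true 1
      simpa using this
    | false =>
      rw [if_neg (by simp), if_neg (by norm_num : ¬ ((0 : Int) ≥ 4))]
      have := go_eq_runF rest false 1
      simpa using this
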